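-- pv_equiv track=rewrite | github.com/CHUNG-JiSeong/Anonymous-2026-submission | core/context_normalizer.py | _slice_local_context
-- ===== SOURCE A (Python) =====
-- from typing import Any, Dict, List, Optional, Tuple
--
-- def _slice_local_context(text: str, span: Optional[Tuple[int,int]], window: int = 160) -> str:
--     if not text:
--         return ""
--     if not span:
--         # span이 없으면 전체에서 앞부분만 사용
--         return text[:min(len(text), 400)].strip()
--
--     # span 클램핑
--     s, e = span
--     n = len(text)
--     s = max(0, min(int(s), n))
--     e = max(0, min(int(e), n))
--     if e < s:
--         s, e = e, s  # 잘못된 순서 방어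
--
--     # 윈도우 자르기
--     left = max(0, s - window)
--     right = min(n, e + window)
--     snippet = text[left:right]
--
--     # 문장 경계(느슨) 찾기
--     punct = ".!?;\n"
--     anchor_in_snip = s - left
--     # 왼쪽 경계: anchor 이전에서 가장 오른쪽 문장부호(없으면 0)
--     left_candidates = []
--     for p in punct:
--         idx = snippet.rfind(p, 0, anchor_in_snip)
--         if idx != -1:
--             left_candidates.append(idx + 1)  # 문장부호 다음부터
--     cut_l = max(left_candidates) if left_candidates else 0
--
--     # 오른쪽 경계: e 이후에서 가장 이른 문장부호(없으면 끝)
--     right_candidates = []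
--     for p in punct:
--         idx = snippet.find(p, e - left)
--         if idx != -1:
--             right_candidates.append(idx)
--     cut_r = min(right_candidates) if right_candidates else len(snippet)
--
--     piece = snippet[cut_l:cut_r].strip()
--     return piece or snippet.strip()
-- ===== SOURCE B (Python) =====
-- # B: replaces the five rfind/find passes + max/min over candidate lists with one
-- # backward and one forward character scan over a punctuation set (same clamping,
-- # windowing and strip/fallback).
-- from typing import Optional, Tuple
--
-- _PUNCT = frozenset(".!?;\n")
--
-- def _norm(i: int, m: int) -> int:
--     # normalize a Python find/rfind slice bound into [0, m]
--     if i < 0: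
--         i += m
--         return 0 if i < 0 else i
--     return m if i > m else i
--
-- def _slice_local_context(text: str, span: Optional[Tuple[int, int]], window: int = 160) -> str:
--     if not text:
--         return ""
--     if not span:
--         return text[:min(len(text), 400)].strip()
--
--     s, e = span
--     n = len(text)
--     s = max(0, min(int(s), n))
--     e = max(0, min(int(e), n))
--     if e < s:
--         s, e = e, s
--
--     left = max(0, s - window)
--     right = min(n, e + window)
--     snippet = text[left:right]
--     m = len(snippet)
--
--     # left boundary: nearest punctuation strictly before the anchor
--     cut_l = 0
--     for i in range(_norm(s - left, m) - 1, -1, -1):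
--         if snippet[i] in _PUNCT:
--             cut_l = i + 1
--             break
--
--     # right boundary: earliest punctuation at/after the span end
--     cut_r = m
--     for i in range(_norm(e - left, m), m):
--         if snippet[i] in _PUNCT:
--             cut_r = i
--             break
--
--     piece = snippet[cut_l:cut_r].strip()
--     return piece or snippet.strip()
-- ===== Notes on version B (the rewrite author's own statement) =====
-- stated objective: alternative
-- what changed: The five rfind/find passes per side plus max/min over candidate lists are replaced by one backward and one forward character scan against a punctuation set that stop at the first boundary character; clamping, windowing and the strip/fallback are unchanged.
import Mathlib
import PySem

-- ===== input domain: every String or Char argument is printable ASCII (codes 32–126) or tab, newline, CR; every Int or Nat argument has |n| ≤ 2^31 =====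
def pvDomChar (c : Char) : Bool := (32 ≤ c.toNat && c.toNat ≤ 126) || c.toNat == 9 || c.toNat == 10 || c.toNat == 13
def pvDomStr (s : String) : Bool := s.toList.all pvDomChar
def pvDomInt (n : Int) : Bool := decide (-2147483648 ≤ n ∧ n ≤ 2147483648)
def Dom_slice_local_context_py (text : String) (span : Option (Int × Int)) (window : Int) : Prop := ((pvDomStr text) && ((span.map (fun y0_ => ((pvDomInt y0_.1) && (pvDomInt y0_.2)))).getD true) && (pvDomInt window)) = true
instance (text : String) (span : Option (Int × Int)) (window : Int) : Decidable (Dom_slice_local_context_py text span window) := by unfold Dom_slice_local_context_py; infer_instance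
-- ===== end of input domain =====

-- B replaces A's five rfind/find passes + max/min over candidate lists by one backward
-- and one forward character scan that stop at the first boundary character (alternative
-- decomposition, same observable behaviour).

-- ===== PORT A =====
-- the punctuation string ".!?;\n" A iterates over
def pvPuncts : List Char := ['.', '!', '?', ';', '\n']

def slice_local_context_py (text : String) (span : Option (Int × Int)) (window : Int) : String :=
  if text.toList = [] then ""
  else
    match span with
    | none => PySem.Str.strip (PySem.Str.slice text none (some (min (PySem.Str.len text) 400)))
    | some (s0, e0) =>
      let n : Int := PySem.Str.len text
      let s1 := max 0 (min s0 n)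
      let e1 := max 0 (min e0 n)
      let s := if e1 < s1 then e1 else s1
      let e := if e1 < s1 then s1 else e1
      let left := max 0 (s - window)
      let right := min n (e + window)
      let snippet := PySem.Str.slice text (some left) (some right)
      let anchor := s - left
      let leftCandidates := pvPuncts.foldl (fun acc p =>
          let idx := PySem.Chars.rfindFrom snippet.toList [p] 0 (some anchor)
          if idx ≠ -1 then acc ++ [idx + 1] else acc) ([] : List Int)
      let cut_l : Int := match PySem.List.max? leftCandidates id with
        | some v => v
        | none => 0
      let rightCandidates := pvPuncts.foldl (fun acc p =>
          let idx := PySem.Chars.findFrom snippet.toList [p] (e - left) none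
          if idx ≠ -1 then acc ++ [idx] else acc) ([] : List Int)
      let cut_r : Int := match PySem.List.min? rightCandidates id with
        | some v => v
        | none => PySem.Str.len snippet
      let piece := PySem.Str.strip (PySem.Str.slice snippet (some cut_l) (some cut_r))
      if piece.toList = [] then PySem.Str.strip snippet else piece

-- ===== PORT B =====
def pvIsPunct (c : Char) : Bool := c == '.' || c == '!' || c == '?' || c == ';' || c == '\n'

-- _norm: normalize a find/rfind slice bound into [0, m]
def pvNormIdx (i : Int) (m : Nat) : Nat :=
  if i < 0 then (if i + m < 0 then 0 else (i + m).toNat)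
  else if i > (m : Int) then m else i.toNat

-- backward scan: i = j-1, j-2, …, 0; first punctuation char gives i+1, else 0
def pvCutL (cs : List Char) : Nat → Nat
  | 0 => 0
  | j + 1 => if pvIsPunct (cs.getD j ' ') then j + 1 else pvCutL cs j

-- forward scan over the suffix starting at absolute index i; first punctuation char gives
-- its absolute index, else i + suffix length (= the snippet length at the end)
def pvCutR (cs : List Char) (i : Nat) : Nat :=
  match cs with
  | [] => i
  | c :: t => if pvIsPunct c then i else pvCutR t (i + 1)

def slice_local_context_py_alt (text : String) (span : Option (Int × Int)) (window : Int) : String :=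
  if text.toList = [] then ""
  else
    match span with
    | none => PySem.Str.strip (PySem.Str.slice text none (some (min (PySem.Str.len text) 400)))
    | some (s0, e0) =>
      let n : Int := PySem.Str.len text
      let s1 := max 0 (min s0 n)
      let e1 := max 0 (min e0 n)
      let s := if e1 < s1 then e1 else s1
      let e := if e1 < s1 then s1 else e1
      let left := max 0 (s - window)
      let right := min n (e + window)
      let snippet := PySem.Str.slice text (some left) (some right)
      let cs := snippet.toList
      let m := cs.length
      let cutl := pvCutL cs (pvNormIdx (s - left) m)
      let k := pvNormIdx (e - left) m
      let cutr := pvCutR (cs.drop k) k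
      let piece := PySem.Str.strip (PySem.Str.slice snippet (some (cutl : Int)) (some (cutr : Int)))
      if piece.toList = [] then PySem.Str.strip snippet else piece

-- ===== PRECONDITION & SPEC =====
def Spec_slice_local_context_py (text : String) (span : Option (Int × Int)) (window : Int) (out : String) : Prop := out = slice_local_context_py_alt text span window
instance (text : String) (span : Option (Int × Int)) (window : Int) (out : String) : Decidable (Spec_slice_local_context_py text span window out) := by unfold Spec_slice_local_context_py; infer_instance

-- ===== CLAIM (what is proved, stated in full; the proofs are below) =====
def Claim_equal_slice_local_context_py : Prop := ∀ (text : String) (span : Option (Int × Int)) (window : Int), Dom_slice_local_context_py text span window → Spec_slice_local_context_py text span window (slice_local_context_py text span window)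

-- ===== LEMMAS AND PROOFS =====

theorem pvNormIdx_le (i : Int) (m : Nat) : pvNormIdx i m ≤ m := by
  unfold pvNormIdx; split_ifs <;> omega

-- Prop-condition variant of the conditional-append loop shape
theorem pv_foldl_append_if {α β : Type} (P : α → Prop) [DecidablePred P] (f : α → β) :
    ∀ (l : List α) (acc : List β),
      l.foldl (fun acc x => if P x then acc ++ [f x] else acc) acc
        = acc ++ (l.filter (fun x => decide (P x))).map f := by
  intro l
  induction l with
  | nil => intro acc; simp
  | cons h t ih =>
    intro acc
    by_cases hP : P h
    · simp [hP, ih, List.append_assoc]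
    · simp [hP, ih]

-- rfind.go is bounded by its counter
theorem rfind_go_le (s sub : List Char) : ∀ j, PySem.Chars.rfind.go s sub j ≤ (j : Int) := by
  intro j
  induction j with
  | zero =>
    simp only [PySem.Chars.rfind.go]
    split
    · simp
    · simp
  | succ j ih =>
    simp only [PySem.Chars.rfind.go]
    split
    · exact le_refl _
    · exact ih.trans (by exact_mod_cast Nat.le_succ j)

-- a single character is never found at or past the end
theorem rfind_singleton_lt (cs : List Char) (p : Char) :
    PySem.Chars.rfind cs [p] < (cs.length : Int) := by
  cases cs with
  | nil => simp [PySem.Chars.rfind, PySem.Chars.rfind.go, List.isPrefixOf]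
  | cons h t =>
    unfold PySem.Chars.rfind
    simp only [List.length_cons]
    simp only [PySem.Chars.rfind.go]
    rw [List.drop_eq_nil_of_le (by simp)]
    have hpre : (([p] : List Char).isPrefixOf []) = false := rfl
    rw [hpre]
    simp only [Bool.false_eq_true, if_false]
    have := rfind_go_le (h :: t) [p] t.length
    push_cast
    linarith

theorem prefix_snoc (l : List Char) (c p : Char) (hne : c ≠ p) :
    ([p] : List Char).isPrefixOf (l ++ [c]) = ([p] : List Char).isPrefixOf l := by
  cases l with
  | nil => simp [List.isPrefixOf, beq_eq_false_iff_ne, Ne.symm hne]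
  | cons h t => simp [List.isPrefixOf]

theorem prefix_drop_snoc (cs : List Char) (c p : Char) (hne : c ≠ p) (k : Nat) :
    ([p] : List Char).isPrefixOf ((cs ++ [c]).drop k) = ([p] : List Char).isPrefixOf (cs.drop k) := by
  by_cases hk : k ≤ cs.length
  · rw [List.drop_append_of_le_length hk]
    exact prefix_snoc (cs.drop k) c p hne
  · rw [List.drop_eq_nil_of_le (by simp; omega), List.drop_eq_nil_of_le (by omega)]

theorem rfind_go_append_of_ne (cs : List Char) (c p : Char) (hne : c ≠ p) :
    ∀ j, PySem.Chars.rfind.go (cs ++ [c]) [p] j = PySem.Chars.rfind.go cs [p] j := by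
  intro j
  induction j with
  | zero =>
    simp only [PySem.Chars.rfind.go]
    have := prefix_drop_snoc cs c p hne 0
    simp only [List.drop_zero] at this
    rw [this]
  | succ j ih =>
    simp only [PySem.Chars.rfind.go]
    rw [prefix_drop_snoc cs c p hne (j + 1), ih]

theorem rfind_snoc (cs : List Char) (c p : Char) :
    PySem.Chars.rfind (cs ++ [c]) [p] =
      if c = p then (cs.length : Int) else PySem.Chars.rfind cs [p] := by
  by_cases hcp : c = p
  · subst hcp
    rw [if_pos rfl]
    unfold PySem.Chars.rfind
    rw [show (cs ++ [c]).length = cs.length + 1 by simp]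
    simp only [PySem.Chars.rfind.go]
    rw [List.drop_eq_nil_of_le (by simp)]
    have hpre : (([c] : List Char).isPrefixOf []) = false := rfl
    rw [hpre]
    simp only [Bool.false_eq_true, if_false]
    -- goal: go (cs++[c]) [c] cs.length = ↑cs.length
    cases cs with
    | nil => simp [PySem.Chars.rfind.go, List.isPrefixOf]
    | cons h t =>
      simp only [List.length_cons]
      simp only [PySem.Chars.rfind.go]
      rw [show ((h :: t) ++ [c]).drop (t.length + 1) = [c] by
        rw [show t.length + 1 = (h :: t).length by simp, List.drop_left]]
      have : (([c] : List Char).isPrefixOf [c]) = true := by simp [List.isPrefixOf]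
      rw [this]
      simp
  · rw [if_neg hcp]
    unfold PySem.Chars.rfind
    rw [show (cs ++ [c]).length = cs.length + 1 by simp]
    rw [rfind_go_append_of_ne cs c p hcp (cs.length + 1)]
    simp only [PySem.Chars.rfind.go]
    rw [List.drop_eq_nil_of_le (by omega)]
    have hpre : (([p] : List Char).isPrefixOf []) = false := rfl
    rw [hpre]
    simp

theorem rfind_nil (p : Char) : PySem.Chars.rfind [] [p] = -1 := by
  simp [PySem.Chars.rfind, PySem.Chars.rfind.go, List.isPrefixOf]

-- find.go shifts its counter
theorem find_go_shift (p : Char) : ∀ (t : List Char) (k : Nat),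
    PySem.Chars.find.go [p] t k =
      if PySem.Chars.find.go [p] t 0 = -1 then -1 else (k : Int) + PySem.Chars.find.go [p] t 0 := by
  intro t
  induction t with
  | nil =>
    intro k
    simp [PySem.Chars.find.go, List.isEmpty]
  | cons h t ih =>
    intro k
    have hge : (-1 : Int) ≤ PySem.Chars.find.go [p] t 0 := by
      have := PySem.Chars.neg_one_le_find t [p]
      unfold PySem.Chars.find at this
      exact this
    by_cases hpre : (([p] : List Char).isPrefixOf (h :: t)) = true
    · simp [PySem.Chars.find.go, hpre]
    · simp only [PySem.Chars.find.go, hpre, Bool.false_eq_true, if_false]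
      rw [ih (k + 1), ih 1]
      by_cases h0 : PySem.Chars.find.go [p] t 0 = -1
      · simp [h0]
      · have h1 : ¬ ((1 : Int) + PySem.Chars.find.go [p] t 0 = -1) := by omega
        simp only [h0, if_false]
        push_cast
        rw [if_neg h1]
        ring

theorem find_nil (p : Char) : PySem.Chars.find [] [p] = -1 := by
  simp [PySem.Chars.find, PySem.Chars.find.go, List.isEmpty]

theorem find_cons (c p : Char) (t : List Char) :
    PySem.Chars.find (c :: t) [p] =
      if p = c then 0
      else if PySem.Chars.find t [p] = -1 then -1 else 1 + PySem.Chars.find t [p] := by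
  unfold PySem.Chars.find
  simp only [PySem.Chars.find.go]
  by_cases hpc : p = c
  · subst hpc
    have : (([p] : List Char).isPrefixOf (p :: t)) = true := by simp [List.isPrefixOf]
    rw [this]
    simp
  · have : (([p] : List Char).isPrefixOf (c :: t)) = false := by
      simp [List.isPrefixOf, beq_eq_false_iff_ne, hpc]
    rw [this]
    simp only [Bool.false_eq_true, if_false, if_neg hpc]
    rw [find_go_shift p t 1]
    simp

-- max?/min? as folds of a named step function, and the value they return
def pvStepMax (acc : Option Int) (y : Int) : Option Int :=
  match acc with
  | none => some y
  | some m => if m < y then some y else some m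

def pvStepMin (acc : Option Int) (y : Int) : Option Int :=
  match acc with
  | none => some y
  | some m => if y < m then some y else some m

theorem max?_eq_scan (l : List Int) : PySem.List.max? l id = List.foldl pvStepMax none l := by
  unfold PySem.List.max?
  generalize (none : Option Int) = acc
  induction l generalizing acc with
  | nil => rfl
  | cons h t ih =>
    simp only [List.foldl_cons]
    rw [ih]
    congr 1
    cases acc <;> rfl

theorem min?_eq_scan (l : List Int) : PySem.List.min? l id = List.foldl pvStepMin none l := by
  unfold PySem.List.min?
  generalize (none : Option Int) = acc
  induction l generalizing acc with
  | nil => rfl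
  | cons h t ih =>
    simp only [List.foldl_cons]
    rw [ih]
    congr 1
    cases acc <;> rfl

theorem pv_max_foldl_aux (x : Int) : ∀ (l : List Int) (a : Int),
    (∀ y ∈ l, y ≤ x) → a ≤ x → (x ∈ l ∨ a = x) →
    List.foldl pvStepMax (some a) l = some x := by
  intro l
  induction l with
  | nil =>
    intro a _ _ hmem
    rcases hmem with h | h
    · cases h
    · simp [h]
  | cons h t ih =>
    intro a hub ha hmem
    simp only [List.foldl_cons]
    rw [show pvStepMax (some a) h = if a < h then some h else some a from rfl]
    have hhx : h ≤ x := hub h (by simp)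
    by_cases hah : a < h
    · rw [if_pos hah]
      apply ih h (fun y hy => hub y (by simp [hy])) hhx
      rcases hmem with hm | hm
      · rcases List.mem_cons.mp hm with hm | hm
        · right; omega
        · left; exact hm
      · omega
    · rw [if_neg hah]
      apply ih a (fun y hy => hub y (by simp [hy])) ha
      rcases hmem with hm | hm
      · rcases List.mem_cons.mp hm with hm | hm
        · right; omega
        · left; exact hm
      · right; exact hm

theorem pv_min_foldl_aux (x : Int) : ∀ (l : List Int) (a : Int),
    (∀ y ∈ l, x ≤ y) → x ≤ a → (x ∈ l ∨ a = x) →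
    List.foldl pvStepMin (some a) l = some x := by
  intro l
  induction l with
  | nil =>
    intro a _ _ hmem
    rcases hmem with h | h
    · cases h
    · simp [h]
  | cons h t ih =>
    intro a hlb ha hmem
    simp only [List.foldl_cons]
    rw [show pvStepMin (some a) h = if h < a then some h else some a from rfl]
    have hhx : x ≤ h := hlb h (by simp)
    by_cases hah : h < a
    · rw [if_pos hah]
      apply ih h (fun y hy => hlb y (by simp [hy])) hhx
      rcases hmem with hm | hm
      · rcases List.mem_cons.mp hm with hm | hm
        · right; omega
        · left; exact hm
      · omega
    · rw [if_neg hah]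
      apply ih a (fun y hy => hlb y (by simp [hy])) ha
      rcases hmem with hm | hm
      · rcases List.mem_cons.mp hm with hm | hm
        · right; omega
        · left; exact hm
      · right; exact hm

theorem maxD_eq {l : List Int} {x : Int} (d : Int) (hx : x ∈ l) (hub : ∀ y ∈ l, y ≤ x) :
    (match PySem.List.max? l id with | some v => v | none => d) = x := by
  cases l with
  | nil => cases hx
  | cons h t =>
    have hsome : PySem.List.max? (h :: t) id = some x := by
      rw [max?_eq_scan]
      simp only [List.foldl_cons]
      rw [show pvStepMax none h = some h from rfl]
      have hmem' : x ∈ t ∨ h = x := by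
        rcases List.mem_cons.mp hx with hm | hm
        · right; exact hm.symm
        · left; exact hm
      exact pv_max_foldl_aux x t h (fun y hy => hub y (by simp [hy])) (hub h (by simp)) hmem'
    rw [hsome]

theorem minD_eq {l : List Int} {x : Int} (d : Int) (hx : x ∈ l) (hlb : ∀ y ∈ l, x ≤ y) :
    (match PySem.List.min? l id with | some v => v | none => d) = x := by
  cases l with
  | nil => cases hx
  | cons h t =>
    have hsome : PySem.List.min? (h :: t) id = some x := by
      rw [min?_eq_scan]
      simp only [List.foldl_cons]
      rw [show pvStepMin none h = some h from rfl]
      have hmem' : x ∈ t ∨ h = x := by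
        rcases List.mem_cons.mp hx with hm | hm
        · right; exact hm.symm
        · left; exact hm
      exact pv_min_foldl_aux x t h (fun y hy => hlb y (by simp [hy])) (hlb h (by simp)) hmem'
    rw [hsome]

theorem mem_pvPuncts_of_isPunct {c : Char} (h : pvIsPunct c = true) : c ∈ pvPuncts := by
  simp only [pvIsPunct, Bool.or_eq_true, beq_iff_eq] at h
  simp only [pvPuncts, List.mem_cons, List.not_mem_nil, or_false]
  tauto

theorem isPunct_of_mem_pvPuncts {c : Char} (h : c ∈ pvPuncts) : pvIsPunct c = true := by
  simp only [pvPuncts, List.mem_cons, List.not_mem_nil, or_false] at h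
  simp only [pvIsPunct, Bool.or_eq_true, beq_iff_eq]
  tauto

-- the left boundary: A's rfind/max over the prefix of length k equals B's backward scan
theorem cutL_core (cs : List Char) : ∀ k, k ≤ cs.length →
    (match PySem.List.max? ((pvPuncts.filter
        (fun p => decide (PySem.Chars.rfind (cs.take k) [p] ≠ -1))).map
        (fun p => PySem.Chars.rfind (cs.take k) [p] + 1)) id with
      | some v => v
      | none => 0) = (pvCutL cs k : Int) := by
  intro k
  induction k with
  | zero =>
    intro _
    simp [rfind_nil, PySem.List.max?, pvCutL]
  | succ k ih =>
    intro hk1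
    have hk : k < cs.length := hk1
    have htake : cs.take (k + 1) = cs.take k ++ [cs[k]] := by
      rw [List.take_succ, List.getElem?_eq_getElem hk]
      rfl
    have hlen : (cs.take k).length = k := by rw [List.length_take]; omega
    have hgd : cs.getD k ' ' = cs[k] := by
      simp [List.getD_eq_getElem?_getD, List.getElem?_eq_getElem hk]
    simp only [htake, rfind_snoc, hlen]
    by_cases hp : pvIsPunct (cs.getD k ' ') = true
    · have hck : pvIsPunct cs[k] = true := by rwa [hgd] at hp
      have hcmem : cs[k] ∈ pvPuncts := mem_pvPuncts_of_isPunct hck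
      have hmem : ((k : Int) + 1) ∈ ((pvPuncts.filter
            (fun p => decide ((if cs[k] = p then (k : Int) else PySem.Chars.rfind (cs.take k) [p]) ≠ -1))).map
            (fun p => (if cs[k] = p then (k : Int) else PySem.Chars.rfind (cs.take k) [p]) + 1)) := by
        refine List.mem_map.mpr ⟨cs[k], List.mem_filter.mpr ⟨hcmem, ?_⟩, ?_⟩
        · rw [if_pos rfl]
          simp only [decide_eq_true_eq]
          omega
        · rw [if_pos rfl]
      have hub : ∀ y ∈ ((pvPuncts.filter
            (fun p => decide ((if cs[k] = p then (k : Int) else PySem.Chars.rfind (cs.take k) [p]) ≠ -1))).map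
            (fun p => (if cs[k] = p then (k : Int) else PySem.Chars.rfind (cs.take k) [p]) + 1)),
            y ≤ (k : Int) + 1 := by
        intro y hy
        rcases List.mem_map.mp hy with ⟨q, _, rfl⟩
        have hlt : PySem.Chars.rfind (cs.take k) [q] < (k : Int) := by
          have := rfind_singleton_lt (cs.take k) q
          rwa [hlen] at this
        split_ifs with h
        · exact le_refl _
        · linarith
      rw [maxD_eq 0 hmem hub]
      have : pvCutL cs (k + 1) = k + 1 := by
        simp only [pvCutL]
        rw [if_pos hp]
      rw [this]
      push_cast
      ring
    · have hne : ∀ q ∈ pvPuncts, cs[k] ≠ q := by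
        intro q hq hcq
        apply hp
        rw [hgd, hcq]
        exact isPunct_of_mem_pvPuncts hq
      have hfix : ∀ q ∈ pvPuncts,
          (if cs[k] = q then (k : Int) else PySem.Chars.rfind (cs.take k) [q])
            = PySem.Chars.rfind (cs.take k) [q] := fun q hq => if_neg (hne q hq)
      have h1 : pvPuncts.filter
            (fun q => decide ((if cs[k] = q then (k : Int) else PySem.Chars.rfind (cs.take k) [q]) ≠ -1))
          = pvPuncts.filter (fun q => decide (PySem.Chars.rfind (cs.take k) [q] ≠ -1)) := by
        apply List.filter_congr
        intro q hq
        rw [hfix q hq]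
      rw [h1]
      have h2 : (pvPuncts.filter (fun q => decide (PySem.Chars.rfind (cs.take k) [q] ≠ -1))).map
            (fun q => (if cs[k] = q then (k : Int) else PySem.Chars.rfind (cs.take k) [q]) + 1)
          = (pvPuncts.filter (fun q => decide (PySem.Chars.rfind (cs.take k) [q] ≠ -1))).map
            (fun q => PySem.Chars.rfind (cs.take k) [q] + 1) := by
        apply List.map_congr_left
        intro q hq
        rw [hfix q (List.mem_filter.mp hq).1]
      rw [h2]
      have hcut : pvCutL cs (k + 1) = pvCutL cs k := by
        simp only [pvCutL]
        rw [if_neg hp]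
      rw [hcut]
      exact ih (by omega)

-- the right boundary: A's find/min over the suffix equals B's forward scan
theorem cutR_core : ∀ (t : List Char) (k : Nat) (d : Int), d = ((k + t.length : Nat) : Int) →
    (match PySem.List.min? ((pvPuncts.filter
        (fun p => decide (PySem.Chars.find t [p] ≠ -1))).map
        (fun p => (k : Int) + PySem.Chars.find t [p])) id with
      | some v => v
      | none => d) = (pvCutR t k : Int) := by
  intro t
  induction t with
  | nil =>
    intro k d hd
    simp [find_nil, PySem.List.min?, pvCutR, hd]
  | cons c t ih =>
    intro k d hd
    by_cases hp : pvIsPunct c = true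
    · have hfc : PySem.Chars.find (c :: t) [c] = 0 := by
        rw [find_cons]
        rw [if_pos rfl]
      have hmem : (k : Int) ∈ ((pvPuncts.filter
            (fun p => decide (PySem.Chars.find (c :: t) [p] ≠ -1))).map
            (fun p => (k : Int) + PySem.Chars.find (c :: t) [p])) := by
        refine List.mem_map.mpr ⟨c, List.mem_filter.mpr ⟨mem_pvPuncts_of_isPunct hp, ?_⟩, ?_⟩
        · rw [hfc]; simp
        · rw [hfc]; ring
      have hlb : ∀ y ∈ ((pvPuncts.filter
            (fun p => decide (PySem.Chars.find (c :: t) [p] ≠ -1))).map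
            (fun p => (k : Int) + PySem.Chars.find (c :: t) [p])), (k : Int) ≤ y := by
        intro y hy
        rcases List.mem_map.mp hy with ⟨q, hq, rfl⟩
        have hnz : PySem.Chars.find (c :: t) [q] ≠ -1 := by
          have := (List.mem_filter.mp hq).2
          simpa using this
        have hge := PySem.Chars.neg_one_le_find (c :: t) [q]
        omega
      rw [minD_eq d hmem hlb]
      have : pvCutR (c :: t) k = k := by
        simp only [pvCutR]
        rw [if_pos hp]
      rw [this]
    · have hne : ∀ q ∈ pvPuncts, q ≠ c := by
        intro q hq hqc
        apply hp
        rw [← hqc]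
        exact isPunct_of_mem_pvPuncts hq
      have hfix : ∀ q ∈ pvPuncts, PySem.Chars.find (c :: t) [q]
          = if PySem.Chars.find t [q] = -1 then -1 else 1 + PySem.Chars.find t [q] := by
        intro q hq
        rw [find_cons, if_neg (hne q hq)]
      have h1 : pvPuncts.filter (fun q => decide (PySem.Chars.find (c :: t) [q] ≠ -1))
          = pvPuncts.filter (fun q => decide (PySem.Chars.find t [q] ≠ -1)) := by
        apply List.filter_congr
        intro q hq
        rw [hfix q hq]
        have hge := PySem.Chars.neg_one_le_find t [q]
        by_cases hf : PySem.Chars.find t [q] = -1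
        · simp [hf]
        · have : ¬ ((1 : Int) + PySem.Chars.find t [q] = -1) := by omega
          simp [hf, this]
      have h2 : (pvPuncts.filter (fun q => decide (PySem.Chars.find t [q] ≠ -1))).map
            (fun q => (k : Int) + PySem.Chars.find (c :: t) [q])
          = (pvPuncts.filter (fun q => decide (PySem.Chars.find t [q] ≠ -1))).map
            (fun q => ((k + 1 : Nat) : Int) + PySem.Chars.find t [q]) := by
        apply List.map_congr_left
        intro q hq
        have hqmem := (List.mem_filter.mp hq).1
        have hqf : PySem.Chars.find t [q] ≠ -1 := by
          have := (List.mem_filter.mp hq).2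
          simpa using this
        rw [hfix q hqmem, if_neg hqf]
        push_cast
        ring
      rw [h1, h2]
      have hcut : pvCutR (c :: t) k = pvCutR t (k + 1) := by
        simp only [pvCutR]
        rw [if_neg hp]
      rw [hcut]
      apply ih (k + 1) d
      rw [hd]
      push_cast
      simp [List.length_cons]
      ring

-- A's rfindFrom with start 0 and a clamped end is rfind on the normalized prefix
theorem rfindFrom_take (cs : List Char) (p : Char) (a : Int) :
    PySem.Chars.rfindFrom cs [p] 0 (some a) =
      PySem.Chars.rfind (cs.take (pvNormIdx a cs.length)) [p] := by
  have hK : (if (cs.length : Int) < a then (cs.length : Int)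
      else if a < 0 then (if a + (cs.length : Int) < 0 then 0 else a + (cs.length : Int)) else a).toNat
      = pvNormIdx a cs.length := by
    unfold pvNormIdx; split_ifs <;> omega
  have hE0 : 0 ≤ (if (cs.length : Int) < a then (cs.length : Int)
      else if a < 0 then (if a + (cs.length : Int) < 0 then 0 else a + (cs.length : Int)) else a) := by
    split_ifs <;> omega
  simp only [PySem.Chars.rfindFrom]
  rw [if_neg (lt_irrefl (0 : Int))]
  rw [if_neg (not_lt.mpr hE0)]
  simp only [Int.toNat_zero, List.drop_zero]
  rw [hK]
  split_ifs with h
  · exact h.symm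
  · exact zero_add _

-- A's findFrom with a raw start is find on the normalized suffix (or -1 past the end)
theorem findFrom_drop (cs : List Char) (p : Char) (r : Int) :
    PySem.Chars.findFrom cs [p] r none =
      if (cs.length : Int) < r then -1
      else if PySem.Chars.find (cs.drop (pvNormIdx r cs.length)) [p] = -1 then -1
      else ((pvNormIdx r cs.length : Nat) : Int) + PySem.Chars.find (cs.drop (pvNormIdx r cs.length)) [p] := by
  simp only [PySem.Chars.findFrom]
  by_cases hr : (cs.length : Int) < r
  · have hr0 : ¬ (r < 0) := by omega
    rw [if_neg hr0, if_pos hr, if_pos hr]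
  · have hst : (if r < 0 then (if r + (cs.length : Int) < 0 then 0 else r + (cs.length : Int)) else r)
        = ((pvNormIdx r cs.length : Nat) : Int) := by
      unfold pvNormIdx; split_ifs <;> omega
    rw [hst]
    have hKle : ¬ ((cs.length : Int) < ((pvNormIdx r cs.length : Nat) : Int)) := by
      have := pvNormIdx_le r cs.length
      exact_mod_cast not_lt.mpr this
    rw [if_neg hKle, if_neg hr]
    simp only [Int.toNat_natCast, List.take_length]

-- A's left cut equals B's left cut
theorem cutL_eq (cs : List Char) (a : Int) :
    (match PySem.List.max? (pvPuncts.foldl (fun acc p =>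
        let idx := PySem.Chars.rfindFrom cs [p] 0 (some a)
        if idx ≠ -1 then acc ++ [idx + 1] else acc) ([] : List Int)) id with
      | some v => v
      | none => 0) = ((pvCutL cs (pvNormIdx a cs.length) : Nat) : Int) := by
  have h1 : (fun (acc : List Int) (p : Char) =>
        let idx := PySem.Chars.rfindFrom cs [p] 0 (some a)
        if idx ≠ -1 then acc ++ [idx + 1] else acc)
      = fun acc p => if PySem.Chars.rfind (cs.take (pvNormIdx a cs.length)) [p] ≠ -1
          then acc ++ [PySem.Chars.rfind (cs.take (pvNormIdx a cs.length)) [p] + 1] else acc := by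
    funext acc p
    simp only [rfindFrom_take]
  rw [h1, pv_foldl_append_if (fun p => PySem.Chars.rfind (cs.take (pvNormIdx a cs.length)) [p] ≠ -1)
        (fun p => PySem.Chars.rfind (cs.take (pvNormIdx a cs.length)) [p] + 1) pvPuncts []]
  rw [List.nil_append]
  exact cutL_core cs (pvNormIdx a cs.length) (pvNormIdx_le a cs.length)

-- A's right cut equals B's right cut
theorem cutR_eq (cs : List Char) (r : Int) :
    (match PySem.List.min? (pvPuncts.foldl (fun acc p =>
        let idx := PySem.Chars.findFrom cs [p] r none
        if idx ≠ -1 then acc ++ [idx] else acc) ([] : List Int)) id with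
      | some v => v
      | none => (cs.length : Int)) =
      ((pvCutR (cs.drop (pvNormIdx r cs.length)) (pvNormIdx r cs.length) : Nat) : Int) := by
  by_cases hr : (cs.length : Int) < r
  · have h1 : (fun (acc : List Int) (p : Char) =>
          let idx := PySem.Chars.findFrom cs [p] r none
          if idx ≠ -1 then acc ++ [idx] else acc)
        = fun acc _ => acc := by
      funext acc p
      simp [findFrom_drop, hr]
    rw [h1]
    have hnorm : pvNormIdx r cs.length = cs.length := by
      unfold pvNormIdx; split_ifs <;> omega
    rw [hnorm, List.drop_length]
    simp [pvPuncts, pvCutR, PySem.List.min?]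
  · have h1 : (fun (acc : List Int) (p : Char) =>
          let idx := PySem.Chars.findFrom cs [p] r none
          if idx ≠ -1 then acc ++ [idx] else acc)
        = fun acc p => if PySem.Chars.find (cs.drop (pvNormIdx r cs.length)) [p] ≠ -1
            then acc ++ [((pvNormIdx r cs.length : Nat) : Int) + PySem.Chars.find (cs.drop (pvNormIdx r cs.length)) [p]] else acc := by
      funext acc p
      have hge := PySem.Chars.neg_one_le_find (cs.drop (pvNormIdx r cs.length)) [p]
      by_cases hf : PySem.Chars.find (cs.drop (pvNormIdx r cs.length)) [p] = -1
      · simp [findFrom_drop, hr, hf]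
      · have hnz : ¬ (((pvNormIdx r cs.length : Nat) : Int) + PySem.Chars.find (cs.drop (pvNormIdx r cs.length)) [p] = -1) := by
          have : (0 : Int) ≤ ((pvNormIdx r cs.length : Nat) : Int) := by positivity
          omega
        simp [findFrom_drop, hr, hf, hnz]
    rw [h1, pv_foldl_append_if
          (fun p => PySem.Chars.find (cs.drop (pvNormIdx r cs.length)) [p] ≠ -1)
          (fun p => ((pvNormIdx r cs.length : Nat) : Int) + PySem.Chars.find (cs.drop (pvNormIdx r cs.length)) [p]) pvPuncts []]
    rw [List.nil_append]
    apply cutR_core (cs.drop (pvNormIdx r cs.length)) (pvNormIdx r cs.length) ((cs.length : Nat) : Int)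
    have := pvNormIdx_le r cs.length
    simp [List.length_drop]
    omega

-- ===== VERDICT (by name: the statement is the Claim_ definition above) =====
theorem slice_local_context_py_spec : Claim_equal_slice_local_context_py := by
  intro text span window _
  unfold Spec_slice_local_context_py slice_local_context_py slice_local_context_py_alt
  by_cases htext : text.toList = []
  · simp [htext]
  · simp only [htext, if_false]
    cases span with
    | none => rfl
    | some se =>
      obtain ⟨s0, e0⟩ := se
      simp only [PySem.Str.len]
      rw [cutL_eq, cutR_eq]
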